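-- pv_equiv track=rewrite | github.com/patricija-sh/year-2-ca268 | w8-quicksort/quicksort-recursive-depth.py | rec_qsort
-- ===== SOURCE A (Python) =====
-- def partition(lst, lo, hi):
--     part = lo
--     while lo < hi:
--         while lst[lo] <= lst[part] and lo < hi:
--             lo += 1
--         while lst[hi] > lst[part]: # Don't have to check for hi >= 0 cos part is there as a sentinel.
--             hi -= 1
--
--         if lo < hi:
--             # Swap the two entries
--             lst[hi], lst[lo] = lst[lo], lst[hi]
--
--     # Swap part into position
--     if lst[part] > lst[hi]: # (this may happen of the array is small (size 2))
--         lst[part], lst[hi] = lst[hi], lst[part]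
--
--     return hi
--
-- def rec_qsort(lst, lo, hi):
--     if lo >= hi:
--         return 0
--     else:  # if lo < hi
--         pivot = partition(lst, lo, hi)
--         left_depth = rec_qsort(lst, lo, pivot - 1) + 1
--         right_depth = rec_qsort(lst, pivot + 1, hi) + 1
--
--     depth = max(left_depth, right_depth)  # left depth and right depth may not be the same.
--     return depth
-- ===== SOURCE B (Python) =====
-- def _scan_up(lst, i, j, part):
--     # first index k in [i, j) whose value exceeds the pivot value, else j
--     for k in range(i, j):
--         if lst[k] > lst[part]:
--             return k
--     return j
--
--
-- def partition(lst, lo, hi):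
--     part = lo
--     while lo < hi:
--         lo = _scan_up(lst, lo, hi, part)
--         while lst[hi] > lst[part]:
--             hi -= 1
--         if lo < hi:
--             lst[hi], lst[lo] = lst[lo], lst[hi]
--     if lst[part] > lst[hi]:
--         lst[part], lst[hi] = lst[hi], lst[part]
--     return hi
--
--
-- def rec_qsort(lst, lo, hi):
--     # iterative: explicit LIFO work list of (lo, hi, edge count); the answer is
--     # the largest edge count reached at a trivial (lo >= hi) range
--     best = 0
--     todo = [(lo, hi, 0)]
--     while todo:
--         a, b, d = todo.pop()
--         if a >= b:
--             if d > best: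
--                 best = d
--         else:
--             p = partition(lst, a, b)
--             # push right first so the left subrange is partitioned first
--             todo.append((p + 1, b, d + 1))
--             todo.append((a, p - 1, d + 1))
--     return best
-- ===== Notes on version B (the rewrite author's own statement) =====
-- stated objective: alternative
-- what changed: rec_qsort's recursion is replaced by an explicit LIFO work list of (lo, hi, edge-count) triples tracking the maximum edge count reached at a trivial range, and partition's upward scan is rewritten as a bounded for-range scan with early exit; the same partitions happen in the same order.
import Mathlib
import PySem

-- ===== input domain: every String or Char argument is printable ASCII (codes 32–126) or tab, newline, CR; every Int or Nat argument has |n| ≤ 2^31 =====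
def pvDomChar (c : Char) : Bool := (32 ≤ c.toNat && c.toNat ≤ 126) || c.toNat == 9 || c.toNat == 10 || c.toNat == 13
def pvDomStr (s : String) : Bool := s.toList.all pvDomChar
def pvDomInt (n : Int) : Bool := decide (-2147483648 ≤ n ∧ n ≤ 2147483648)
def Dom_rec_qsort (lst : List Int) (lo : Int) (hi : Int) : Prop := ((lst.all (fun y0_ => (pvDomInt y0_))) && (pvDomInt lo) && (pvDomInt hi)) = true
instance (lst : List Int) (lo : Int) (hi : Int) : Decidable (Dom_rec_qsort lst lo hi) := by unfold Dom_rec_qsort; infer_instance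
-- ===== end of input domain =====

-- B replaces rec_qsort's recursion by an explicit LIFO work list of (lo, hi, edges) triples
-- and rewrites partition's upward scan as a bounded range scan with early exit (alternative
-- decomposition, no speed claim).
-- Both Pythons mutate lst in place identically; the equivalence proved here is about the return value.

-- ===== PORT A =====
-- lst[i] (possibly negative index); total form — inside Pre_ every index used is in range
def pyGetE (lst : List Int) (i : Int) : Int := PySem.List.pyGetD lst i 0
-- Python's simultaneous swap lst[i], lst[j] = lst[j], lst[i] (assignment to i happens first)
def swapE (lst : List Int) (i j : Int) : List Int :=
  PySem.List.pySetD (PySem.List.pySetD lst i (pyGetE lst j)) j (pyGetE lst i)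

-- while lst[lo] <= lst[part] and lo < hi: lo += 1     (fuel-driven; fuel suffices inside Pre_)
def loLoop : Nat → List Int → Int → Int → Int → Int
  | 0, _, _, lo, _ => lo
  | f + 1, lst, part, lo, hi =>
    if pyGetE lst lo ≤ pyGetE lst part ∧ lo < hi then loLoop f lst part (lo + 1) hi else lo

-- while lst[hi] > lst[part]: hi -= 1
def hiLoop : Nat → List Int → Int → Int → Int
  | 0, _, _, hi => hi
  | f + 1, lst, part, hi =>
    if pyGetE lst part < pyGetE lst hi then hiLoop f lst part (hi - 1) else hi

-- the outer 'while lo < hi' of partition; returns (lst, lo, hi) at loop exit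
def outerLoop : Nat → List Int → Int → Int → Int → List Int × Int × Int
  | 0, lst, _, lo, hi => (lst, lo, hi)
  | f + 1, lst, part, lo, hi =>
    if lo < hi then
      let lo' := loLoop ((hi - lo).toNat + 1) lst part lo hi
      let hi' := hiLoop ((hi - part).toNat + 1) lst part hi
      let lst' := if lo' < hi' then swapE lst hi' lo' else lst
      outerLoop f lst' part lo' hi'
    else (lst, lo, hi)

-- partition(lst, lo, hi): returns (mutated lst, pivot)
def partitionA (lst : List Int) (lo hi : Int) : List Int × Int :=
  let part := lo
  let r := outerLoop (2 * (hi - lo).toNat + 2) lst part lo hi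
  let lst1 := r.1
  let hi1 := r.2.2
  let lst2 := if pyGetE lst1 hi1 < pyGetE lst1 part then swapE lst1 part hi1 else lst1
  (lst2, hi1)

-- rec_qsort, fuel-driven (fuel (hi-lo).toNat+1 covers the recursion depth inside Pre_);
-- threads the mutated list and returns (depth, lst)
def recQ : Nat → List Int → Int → Int → Int × List Int
  | 0, lst, _, _ => (0, lst)
  | f + 1, lst, lo, hi =>
    if lo ≥ hi then (0, lst)
    else
      let pr := partitionA lst lo hi
      let l := recQ f pr.1 lo (pr.2 - 1)
      let r := recQ f l.2 (pr.2 + 1) hi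
      (max (l.1 + 1) (r.1 + 1), r.2)

def rec_qsort (lst : List Int) (lo : Int) (hi : Int) : Int :=
  (recQ ((hi - lo).toNat + 1) lst lo hi).1

-- ===== PORT B =====
-- _scan_up: 'for k in range(i, j): if lst[k] > lst[part]: return k' then 'return j'
def scanUpGo (lst : List Int) (part j : Int) : List Int → Int
  | [] => j
  | k :: ks =>
    if PySem.List.pyGetD lst part 0 < PySem.List.pyGetD lst k 0 then k
    else scanUpGo lst part j ks

def scanUp (lst : List Int) (i j part : Int) : Int :=
  scanUpGo lst part j (PySem.List.pyRange i j 1)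

-- while lst[hi] > lst[part]: hi -= 1   (B keeps this descent as a while loop)
def descendB : Nat → List Int → Int → Int → Int
  | 0, _, _, hi => hi
  | f + 1, lst, part, hi =>
    if PySem.List.pyGetD lst part 0 < PySem.List.pyGetD lst hi 0 then
      descendB f lst part (hi - 1)
    else hi

-- lst[i], lst[j] = lst[j], lst[i]
def swapB (lst : List Int) (i j : Int) : List Int :=
  PySem.List.pySetD (PySem.List.pySetD lst i (PySem.List.pyGetD lst j 0)) j
    (PySem.List.pyGetD lst i 0)

-- partition's outer 'while lo < hi' in B
def partLoopB : Nat → List Int → Int → Int → Int → List Int × Int × Int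
  | 0, lst, _, lo, hi => (lst, lo, hi)
  | f + 1, lst, part, lo, hi =>
    if lo < hi then
      let lo' := scanUp lst lo hi part
      let hi' := descendB ((hi - part).toNat + 1) lst part hi
      partLoopB f (if lo' < hi' then swapB lst hi' lo' else lst) part lo' hi'
    else (lst, lo, hi)

def partitionB (lst : List Int) (lo hi : Int) : List Int × Int :=
  let r := partLoopB (2 * (hi - lo).toNat + 2) lst lo lo hi
  let j := r.2.2
  ((if PySem.List.pyGetD r.1 j 0 < PySem.List.pyGetD r.1 lo 0 then swapB r.1 lo j else r.1), j)

-- the 'while todo:' loop of Source B; the Lean list head is the Python list's end (todo.pop())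
def stackLoop : Nat → List Int → List (Int × Int × Int) → Int → Int
  | 0, _, _, best => best
  | _ + 1, _, [], best => best
  | f + 1, lst, (a, b, d) :: rest, best =>
    if a ≥ b then stackLoop f lst rest (if d > best then d else best)
    else
      let pr := partitionB lst a b
      stackLoop f pr.1 ((a, pr.2 - 1, d + 1) :: (pr.2 + 1, b, d + 1) :: rest) best

def rec_qsort_alt (lst : List Int) (lo : Int) (hi : Int) : Int :=
  stackLoop (2 * (hi - lo + 1).toNat + 1) lst [(lo, hi, 0)] 0

-- ===== PRECONDITION & SPEC =====
-- Pre_ excludes exactly the calls on which Python A raises IndexError: a nontrivial range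
-- whose bounds fall outside Python's indexable window [-len, len).
def Pre_rec_qsort (lst : List Int) (lo : Int) (hi : Int) : Prop :=
  lo < hi → (-(lst.length : Int) ≤ lo ∧ hi < (lst.length : Int))
instance (lst : List Int) (lo : Int) (hi : Int) : Decidable (Pre_rec_qsort lst lo hi) := by
  unfold Pre_rec_qsort; infer_instance

def pvWitness_rec_qsort : List Int × Int × Int := ([3, 1, 2], 0, 2)

def Spec_rec_qsort (lst : List Int) (lo : Int) (hi : Int) (out : Int) : Prop := out = rec_qsort_alt lst lo hi
instance (lst : List Int) (lo : Int) (hi : Int) (out : Int) : Decidable (Spec_rec_qsort lst lo hi out) := by unfold Spec_rec_qsort; infer_instance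

-- ===== CLAIM (what is proved, stated in full; the proofs are below) =====
def Claim_equal_rec_qsort : Prop := ∀ (lst : List Int) (lo : Int) (hi : Int), Dom_rec_qsort lst lo hi → Pre_rec_qsort lst lo hi → Spec_rec_qsort lst lo hi (rec_qsort lst lo hi)

-- ===== LEMMAS AND PROOFS =====

-- B's bounded upward range scan computes exactly A's fuelled lo-loop
theorem scanUp_eq_loLoop (lst : List Int) (part j : Int) :
    ∀ (n : Nat) (i : Int), i ≤ j → (j - i).toNat = n →
      loLoop (n + 1) lst part i j = scanUp lst i j part := by
  intro n
  induction n with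
  | zero =>
    intro i hij hn
    have : i = j := by omega
    subst this
    simp [loLoop, scanUp, scanUpGo]
  | succ n ih =>
    intro i hij hn
    have hlt : i < j := by omega
    have hstep : loLoop (n + 1 + 1) lst part i j
        = if pyGetE lst i ≤ pyGetE lst part ∧ i < j then loLoop (n + 1) lst part (i + 1) j
          else i := rfl
    rw [scanUp, PySem.List.pyRange_one_cons hlt, hstep]
    by_cases h : pyGetE lst part < pyGetE lst i
    · rw [if_neg (fun hc => absurd h (not_lt.mpr hc.1)), scanUpGo,
        if_pos (by simpa [pyGetE] using h)]
    · rw [if_pos ⟨not_lt.mp h, hlt⟩, scanUpGo, if_neg (by simpa [pyGetE] using h),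
        ih (i + 1) (by omega) (by omega), scanUp]

theorem descendB_eq_hiLoop (lst : List Int) (part : Int) :
    ∀ (f : Nat) (hi : Int), descendB f lst part hi = hiLoop f lst part hi := by
  intro f
  induction f with
  | zero => intro hi; rfl
  | succ f ih => intro hi; simp [descendB, hiLoop, pyGetE, ih]

theorem swapB_eq_swapE (lst : List Int) (i j : Int) : swapB lst i j = swapE lst i j := rfl

theorem partLoopB_eq_outerLoop (part : Int) :
    ∀ (f : Nat) (lst : List Int) (lo hi : Int),
      partLoopB f lst part lo hi = outerLoop f lst part lo hi := by
  intro f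
  induction f with
  | zero => intro lst lo hi; rfl
  | succ f ih =>
    intro lst lo hi
    simp only [partLoopB, outerLoop]
    split
    · rename_i hlt
      rw [← scanUp_eq_loLoop lst part hi (hi - lo).toNat lo (le_of_lt hlt) rfl,
        descendB_eq_hiLoop, swapB_eq_swapE, ih]
    · rfl

theorem partitionB_eq_partitionA (lst : List Int) (lo hi : Int) :
    partitionB lst lo hi = partitionA lst lo hi := by
  simp only [partitionB, partitionA, partLoopB_eq_outerLoop, pyGetE, swapB_eq_swapE]
  rfl

-- the pivot returned by partitionA lies in [lo, hi] whenever lo < hi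
theorem hiLoop_ge (f : Nat) (lst : List Int) (part hi : Int) (h : part ≤ hi) :
    part ≤ hiLoop f lst part hi ∧ hiLoop f lst part hi ≤ hi := by
  induction f generalizing hi with
  | zero => exact ⟨h, le_refl _⟩
  | succ f ih =>
    simp only [hiLoop]
    split
    · rename_i hc
      have hne : part ≠ hi := by rintro rfl; exact absurd hc (lt_irrefl _)
      have := ih (hi - 1) (by omega)
      exact ⟨this.1, by omega⟩
    · exact ⟨h, le_refl _⟩

theorem outerLoop_hi_bounds (f : Nat) (lst : List Int) (part lo hi : Int)
    (h : part ≤ hi) (hlo : part ≤ lo) :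
    part ≤ (outerLoop f lst part lo hi).2.2 ∧ (outerLoop f lst part lo hi).2.2 ≤ hi := by
  induction f generalizing lst lo hi with
  | zero => exact ⟨h, le_refl _⟩
  | succ f ih =>
    simp only [outerLoop]
    split
    · rename_i hc
      have hb := hiLoop_ge ((hi - part).toNat + 1) lst part hi h
      have hlo' : part ≤ loLoop ((hi - lo).toNat + 1) lst part lo hi := by
        have : ∀ g l, part ≤ l → part ≤ loLoop g lst part l hi := by
          intro g
          induction g with
          | zero => intro l hl; exact hl
          | succ g ihg =>
            intro l hl
            simp only [loLoop]
            split
            · exact ihg (l + 1) (by omega)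
            · exact hl
        exact this _ lo hlo
      have := ih (if loLoop ((hi - lo).toNat + 1) lst part lo hi < hiLoop ((hi - part).toNat + 1) lst part hi then swapE lst (hiLoop ((hi - part).toNat + 1) lst part hi) (loLoop ((hi - lo).toNat + 1) lst part lo hi) else lst) (loLoop ((hi - lo).toNat + 1) lst part lo hi) (hiLoop ((hi - part).toNat + 1) lst part hi) hb.1 hlo'
      exact ⟨this.1, le_trans this.2 hb.2⟩
    · exact ⟨h, le_refl _⟩

theorem partitionA_pivot_bounds (lst : List Int) (lo hi : Int) (h : lo < hi) :
    lo ≤ (partitionA lst lo hi).2 ∧ (partitionA lst lo hi).2 ≤ hi := by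
  simp only [partitionA]
  exact outerLoop_hi_bounds _ lst lo lo hi (le_of_lt h) (le_refl _)

-- recQ is insensitive to the fuel as long as the fuel exceeds hi - lo
theorem recQ_fuel_stable (f : Nat) :
    ∀ (g : Nat) (lst : List Int) (lo hi : Int),
      (hi - lo).toNat < f → (hi - lo).toNat < g → recQ f lst lo hi = recQ g lst lo hi := by
  induction f with
  | zero => intro g lst lo hi hf; omega
  | succ f ih =>
    intro g lst lo hi hf hg
    match g, hg with
    | g + 1, hg =>
      simp only [recQ]
      split
      · rfl
      · rename_i hlt
        rw [ge_iff_le, not_le] at hlt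
        have hp := partitionA_pivot_bounds lst lo hi hlt
        have h1 : recQ f (partitionA lst lo hi).1 lo ((partitionA lst lo hi).2 - 1)
            = recQ g (partitionA lst lo hi).1 lo ((partitionA lst lo hi).2 - 1) :=
          ih g _ _ _ (by omega) (by omega)
        rw [h1]
        have h2 := ih g (recQ g (partitionA lst lo hi).1 lo ((partitionA lst lo hi).2 - 1)).2
          ((partitionA lst lo hi).2 + 1) hi (by omega) (by omega)
        rw [h2]

-- spec-side evaluation of the stack: process each entry with the canonical recursive depth
def runAll : List Int → List (Int × Int × Int) → Int → Int
  | _, [], md => md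
  | lst, (lo, hi, e) :: rest, md =>
    let d := recQ ((hi - lo).toNat + 1) lst lo hi
    runAll d.2 rest (max md (e + d.1))

-- fuel bound charged to one stack entry
def entryBound (t : Int × Int × Int) : Nat := 2 * (t.2.1 - t.1 + 1).toNat + 1

theorem stackLoop_eq_runAll (fb : Nat) :
    ∀ (lst : List Int) (stack : List (Int × Int × Int)) (md : Int),
      (stack.map entryBound).sum ≤ fb → stackLoop fb lst stack md = runAll lst stack md := by
  induction fb with
  | zero =>
    intro lst stack md hs
    match stack with
    | [] => rfl
    | (lo, hi, e) :: rest => simp [entryBound] at hs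
  | succ fb ih =>
    intro lst stack md hs
    match stack with
    | [] => rfl
    | (lo, hi, e) :: rest =>
      simp only [List.map_cons, List.sum_cons, entryBound] at hs
      simp only [stackLoop, runAll, partitionB_eq_partitionA]
      split
      · rename_i hge
        have : recQ ((hi - lo).toNat + 1) lst lo hi = (0, lst) := by
          simp only [recQ]
          rw [if_pos hge]
        rw [ih lst rest _ (by omega), this]
        have : (if e > md then e else md) = max md (e + (0, lst).1) := by
          simp only []
          omega
        rw [this]
      · rename_i hlt
        rw [ge_iff_le, not_le] at hlt
        have hp := partitionA_pivot_bounds lst lo hi hlt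
        set pr := partitionA lst lo hi with hpr
        -- unfold the spec-side entry
        have hunf : recQ ((hi - lo).toNat + 1) lst lo hi
            = (max ((recQ (hi - lo).toNat pr.1 lo (pr.2 - 1)).1 + 1)
                   ((recQ (hi - lo).toNat (recQ (hi - lo).toNat pr.1 lo (pr.2 - 1)).2 (pr.2 + 1) hi).1 + 1),
               (recQ (hi - lo).toNat (recQ (hi - lo).toNat pr.1 lo (pr.2 - 1)).2 (pr.2 + 1) hi).2) := by
          simp only [recQ]
          rw [if_neg (by omega)]
        have hl : recQ (hi - lo).toNat pr.1 lo (pr.2 - 1)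
            = recQ ((pr.2 - 1 - lo).toNat + 1) pr.1 lo (pr.2 - 1) :=
          recQ_fuel_stable _ _ _ _ _ (by omega) (by omega)
        have hr : ∀ l, recQ (hi - lo).toNat l (pr.2 + 1) hi
            = recQ ((hi - (pr.2 + 1)).toNat + 1) l (pr.2 + 1) hi := fun l =>
          recQ_fuel_stable _ _ _ _ _ (by omega) (by omega)
        rw [ih pr.1 ((lo, pr.2 - 1, e + 1) :: (pr.2 + 1, hi, e + 1) :: rest) md
            (by simp only [List.map_cons, List.sum_cons, entryBound]; omega)]
        simp only [runAll, hunf, hl, hr]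
        congr 1
        omega

theorem recQ_nonneg (f : Nat) (lst : List Int) (lo hi : Int) : 0 ≤ (recQ f lst lo hi).1 := by
  induction f generalizing lst lo hi with
  | zero => simp [recQ]
  | succ f ih =>
    simp only [recQ]
    split
    · simp
    · simp only []
      have := ih (recQ f (partitionA lst lo hi).1 lo ((partitionA lst lo hi).2 - 1)).2
        ((partitionA lst lo hi).2 + 1) hi
      omega

-- ===== VERDICT (by name: the statement is the Claim_ definition above) =====
theorem rec_qsort_spec : Claim_equal_rec_qsort := by
  intro lst lo hi _ _
  unfold Spec_rec_qsort rec_qsort rec_qsort_alt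
  rw [stackLoop_eq_runAll _ lst [(lo, hi, 0)] 0 (by simp [entryBound])]
  simp only [runAll]
  have := recQ_nonneg ((hi - lo).toNat + 1) lst lo hi
  omega
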